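-- pv_equiv track=rewrite | github.com/fernandopalafox/aoc | 2023/3/m1.py | find_sym_blocks
-- ===== SOURCE A (Python) =====
-- def find_sym_blocks(line):
--     blocks = []
--     in_block = False
--     block_start = 0
--     block_end = 0
--     for index, char in enumerate(line):
--         if not char.isalnum() and not in_block and not char == '.':
--             block_start = index
--             in_block = True
--         elif (char.isalnum() or char == '.') and in_block:
--             block_end = index - 1
--             in_block = False
--             blocks.append(block_start)
--     if in_block:
--         block_end = len(line) - 1 # 0 indexing and ignore newline
--         blocks.append(block_start)
--     return blocks
-- ===== SOURCE B (Python) =====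
-- def find_sym_blocks(line):
--     def sym(c):
--         return not c.isalnum() and c != '.'
--     blocks = []
--     i = 0
--     n = len(line)
--     while i < n:
--         s = sym(line[i])
--         j = i + 1
--         while j < n and sym(line[j]) == s:
--             j += 1
--         if s:
--             blocks.append(i)
--         i = j
--     return blocks
-- ===== Notes on version B (the rewrite author's own statement) =====
-- stated objective: alternative
-- what changed: Replaced the per-character flag automaton (in_block state with a trailing-block special case) by maximal-run segmentation: an outer loop per run with an inner scan that finds the run's end, appending the run's start index when the run is a symbol run.
import Mathlib
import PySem

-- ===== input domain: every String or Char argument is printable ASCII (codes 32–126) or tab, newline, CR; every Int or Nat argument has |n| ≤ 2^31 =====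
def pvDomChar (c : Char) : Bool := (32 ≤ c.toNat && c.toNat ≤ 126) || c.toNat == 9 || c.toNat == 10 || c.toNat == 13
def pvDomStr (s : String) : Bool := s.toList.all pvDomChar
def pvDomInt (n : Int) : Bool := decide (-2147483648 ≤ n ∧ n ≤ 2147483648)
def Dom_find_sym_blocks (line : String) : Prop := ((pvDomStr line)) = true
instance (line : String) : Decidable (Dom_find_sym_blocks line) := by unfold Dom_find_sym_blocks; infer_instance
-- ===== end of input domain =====

-- B replaces A's per-character in_block flag automaton (with its trailing-block special case)
-- by maximal-run segmentation: an outer loop per run, an inner scan finding the run's end,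
-- recording the start of each symbol run; objective: alternative (same cost, different structure).

-- ===== PORT A =====
-- state: (blocks, in_block, block_start, block_end); block_end is tracked but unused, as in A
def pvStepA (st : List Int × Bool × Int × Int) (p : Int × Char) : List Int × Bool × Int × Int :=
  let (blocks, in_block, block_start, block_end) := st
  let (index, char) := p
  if !(PySem.Chars.isalnum char) && !in_block && !(char == '.') then
    (blocks, true, index, block_end)
  else if (PySem.Chars.isalnum char || char == '.') && in_block then
    (blocks ++ [block_start], false, block_start, index - 1)
  else (blocks, in_block, block_start, block_end)

def find_sym_blocks (line : String) : List Int :=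
  let r := (PySem.List.enumerate line.toList 0).foldl pvStepA ([], false, 0, 0)
  if r.2.1 then r.1 ++ [r.2.2.1] else r.1

-- ===== PORT B =====
def pvSym (c : Char) : Bool := !(PySem.Chars.isalnum c) && !(c == '.')

-- the outer while loop of Source B, one step per maximal run; the inner while loop (advancing j
-- while sym(line[j]) == s) is the takeWhile/dropWhile split of the remaining characters
def pvRuns (i : Int) : List Char → List Int
  | [] => []
  | c :: cs =>
    let s := pvSym c
    let run := cs.takeWhile (fun d => pvSym d == s)
    let rest := cs.dropWhile (fun d => pvSym d == s)
    (if s then [i] else []) ++ pvRuns (i + 1 + run.length) rest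
termination_by cs => cs.length
decreasing_by
  exact Nat.lt_succ_of_le (List.length_dropWhile_le _ _)

def find_sym_blocks_alt (line : String) : List Int := pvRuns 0 line.toList

-- ===== PRECONDITION & SPEC =====
def Spec_find_sym_blocks (line : String) (out : List Int) : Prop := out = find_sym_blocks_alt line
instance (line : String) (out : List Int) : Decidable (Spec_find_sym_blocks line out) := by unfold Spec_find_sym_blocks; infer_instance

-- ===== CLAIM (what is proved, stated in full; the proofs are below) =====
def Claim_equal_find_sym_blocks : Prop := ∀ (line : String), Dom_find_sym_blocks line → Spec_find_sym_blocks line (find_sym_blocks line)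

-- ===== LEMMAS AND PROOFS =====

-- common recursive characterization: block starts of cs, indices from i, prev = "previous char is a symbol"
def pvGo (prev : Bool) (i : Int) : List Char → List Int
  | [] => []
  | c :: cs => if pvSym c && !prev then i :: pvGo true (i + 1) cs
               else pvGo (pvSym c) (i + 1) cs

lemma A_eq_go (cs : List Char) : ∀ (acc : List Int) (inb : Bool) (b e i : Int),
    (let r := (PySem.List.enumerate cs i).foldl pvStepA (acc, inb, b, e)
     if r.2.1 then r.1 ++ [r.2.2.1] else r.1)
    = acc ++ (if inb then [b] else []) ++ pvGo inb i cs := by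
  induction cs with
  | nil =>
    intro acc inb b e i
    cases inb <;> simp [PySem.List.enumerate_nil, pvGo]
  | cons c cs ih =>
    intro acc inb b e i
    rw [PySem.List.enumerate_cons, List.foldl_cons]
    cases h1 : PySem.Chars.isalnum c <;> cases h2 : (c == '.') <;> cases inb <;>
      simp only [pvStepA, pvGo, pvSym, h1, h2, Bool.not_true, Bool.not_false, Bool.and_true,
        Bool.and_false, Bool.or_true, Bool.or_false] <;>
      simp only [ih] <;> simp

-- skipping a run of characters that all have symbol-status b keeps pvGo in the else branch
lemma go_skip_run (b : Bool) : ∀ (run : List Char) (rest : List Char) (j : Int),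
    (∀ d ∈ run, pvSym d = b) →
    pvGo b j (run ++ rest) = pvGo b (j + run.length) rest := by
  intro run
  induction run with
  | nil => intro rest j _; simp
  | cons d ds ih =>
    intro rest j h
    have hd : pvSym d = b := h d (by simp)
    have hrec := ih rest (j + 1) (fun x hx => h x (by simp [hx]))
    cases b <;> simp [pvGo, hd, hrec] <;> ring_nf

lemma head_dropWhile_false {α : Type} (p : α → Bool) : ∀ (l : List α) (x : α),
    (l.dropWhile p).head? = some x → p x = false := by
  intro l
  induction l with
  | nil => intro x h; simp [List.dropWhile] at h
  | cons a t ih =>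
    intro x h
    rw [List.dropWhile_cons] at h
    by_cases hp : p a = true
    · rw [if_pos hp] at h; exact ih x h
    · rw [if_neg hp] at h
      simp at h
      rw [← h]
      simpa using hp

lemma go_true_eq_false_of_head (j : Int) (rest : List Char)
    (h : ∀ x, rest.head? = some x → pvSym x = false) :
    pvGo true j rest = pvGo false j rest := by
  cases rest with
  | nil => rfl
  | cons d ds =>
    have hd : pvSym d = false := h d rfl
    simp [pvGo, hd]

lemma runs_eq_go_aux : ∀ (n : Nat) (cs : List Char), cs.length ≤ n →
    ∀ (i : Int), pvRuns i cs = pvGo false i cs := by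
  intro n
  induction n with
  | zero =>
    intro cs h i
    have : cs = [] := List.eq_nil_of_length_eq_zero (Nat.le_zero.mp h)
    subst this
    simp [pvRuns, pvGo]
  | succ n ih =>
    intro cs h i
    cases cs with
    | nil => simp [pvRuns, pvGo]
    | cons c cs =>
      have hlen : cs.length ≤ n := by simpa using h
      rw [pvRuns]
      have hrun : ∀ d ∈ cs.takeWhile (fun d => pvSym d == pvSym c), pvSym d = pvSym c := by
        intro d hd
        have := List.mem_takeWhile_imp hd
        simpa using this
      have hrest : ∀ x, (cs.dropWhile (fun d => pvSym d == pvSym c)).head? = some x →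
          (pvSym x == pvSym c) = false := fun x hx => head_dropWhile_false _ cs x hx
      have hsplit : cs.takeWhile (fun d => pvSym d == pvSym c)
          ++ cs.dropWhile (fun d => pvSym d == pvSym c) = cs := List.takeWhile_append_dropWhile
      have hrlen : (cs.dropWhile (fun d => pvSym d == pvSym c)).length ≤ n :=
        le_trans (List.length_dropWhile_le _ _) hlen
      have hih := ih _ hrlen (i + 1 + (cs.takeWhile (fun d => pvSym d == pvSym c)).length)
      have hskip := go_skip_run (pvSym c) (cs.takeWhile (fun d => pvSym d == pvSym c))
        (cs.dropWhile (fun d => pvSym d == pvSym c)) (i + 1) hrun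
      rw [hsplit] at hskip
      cases hs : pvSym c with
      | true =>
        rw [hs] at hrun hrest hskip
        rw [pvGo]
        simp only [hs, Bool.not_false, Bool.and_true]
        rw [hskip]
        rw [go_true_eq_false_of_head _ _ (by
          intro x hx
          have := hrest x hx
          simpa using this)]
        rw [hs] at hih
        rw [hih]
        simp
      | false =>
        rw [hs] at hrun hrest hskip
        simp only [if_neg (Bool.false_ne_true), List.nil_append]
        rw [pvGo]
        simp only [hs, Bool.false_and, if_neg (Bool.false_ne_true)]
        rw [hskip]
        rw [hs] at hih
        rw [hih]

lemma runs_eq_go (cs : List Char) (i : Int) : pvRuns i cs = pvGo false i cs :=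
  runs_eq_go_aux cs.length cs le_rfl i

-- ===== VERDICT (by name: the statement is the Claim_ definition above) =====
theorem find_sym_blocks_spec : Claim_equal_find_sym_blocks := by
  intro line _
  show find_sym_blocks line = find_sym_blocks_alt line
  have hA := A_eq_go line.toList [] false 0 0 0
  simp only [List.nil_append, if_neg (by simp : ¬ (false = true))] at hA
  unfold find_sym_blocks find_sym_blocks_alt
  rw [hA, runs_eq_go]
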